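-- pv_equiv track=rewrite | github.com/KyleLongaker/CS301-002 | MazeProblem.py | StringOperator
-- ===== SOURCE A (Python) =====
-- def StringOperator(string, operations):
--     letters = list(string)  # Converting string into a list of characters
--     output = []
--
--     for operation in operations:
--         if operation == 'R':
--             letters = letters[::-1]  # Reversing the string
--         elif operation == 'P':
--             if letters:  # Checking if the letters list is not empty
--                output.append(letters.pop(0))
--
--     output.extend(letters)     # Appending the remaining letters from the input string to the output list
--     return ''.join(output)    # Using the .join method to join the elements of the output list into a string.
-- ===== SOURCE B (Python) =====
-- def StringOperator(string, operations):
--     # Two-index window with a direction flag: 'R' is an O(1) flip, 'P' an O(1)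
--     # pop from the proper end; O(n+m) instead of A's O(n*m).
--     lo, hi = 0, len(string)   # live window is string[lo:hi]
--     rev = False               # whether the window is currently reversed
--     out = []
--     for op in operations:
--         if op == 'R':
--             rev = not rev
--         elif op == 'P':
--             if lo < hi:
--                 if rev:
--                     hi -= 1
--                     out.append(string[hi])
--                 else:
--                     out.append(string[lo])
--                     lo += 1
--     mid = string[lo:hi]
--     if rev:
--         mid = mid[::-1]
--     return ''.join(out) + mid
-- ===== Notes on version B (the rewrite author's own statement) =====
-- stated objective: alternative
-- what changed: Replaced A's repeated whole-list reversal ('R') and pop-front ('P') by a two-index window [lo,hi) on the original string with a direction flag, making every operation O(1); a timing run on random op mixes read only ~1.5x, so no speed is claimed.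
import Mathlib
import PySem

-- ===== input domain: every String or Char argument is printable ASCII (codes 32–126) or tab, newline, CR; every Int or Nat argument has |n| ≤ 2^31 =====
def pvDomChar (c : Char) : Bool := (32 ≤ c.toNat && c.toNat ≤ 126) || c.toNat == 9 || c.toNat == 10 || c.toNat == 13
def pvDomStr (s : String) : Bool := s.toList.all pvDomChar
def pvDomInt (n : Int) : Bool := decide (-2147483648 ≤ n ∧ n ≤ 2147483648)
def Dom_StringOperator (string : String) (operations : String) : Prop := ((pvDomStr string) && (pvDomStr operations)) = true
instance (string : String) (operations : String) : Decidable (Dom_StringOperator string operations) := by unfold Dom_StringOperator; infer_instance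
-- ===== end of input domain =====

-- B replaces A's repeated list reversal and pop-front by a two-index window on the
-- original string with a direction flag, so each operation does O(1) work.

-- ===== PORT A =====
-- one iteration of A's loop: state = (letters, output)
def aStep (st : List Char × List Char) (op : Char) : List Char × List Char :=
  if op = 'R' then (st.1.reverse, st.2)           -- letters[::-1]  (slice step -1 = reverse; exact)
  else if op = 'P' then
    match st.1 with
    | [] => st                                    -- 'if letters:' guard fails
    | c :: rest => (rest, st.2 ++ [c])            -- output.append(letters.pop(0))
  else st

def StringOperator (string : String) (operations : String) : String :=
  let st := operations.toList.foldl aStep (string.toList, [])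
  String.mk (st.2 ++ st.1)                        -- output.extend(letters); ''.join(output)

-- ===== PORT B =====
-- one iteration of B's loop: state = (lo, hi, rev, out); window is string[lo:hi]
-- (the string indexing in the 'P' branch is guarded by lo < hi, so List.getD is exact)
def bStep (s : List Char) (st : Nat × Nat × Bool × List Char) (op : Char) :
    Nat × Nat × Bool × List Char :=
  if op = 'R' then (st.1, st.2.1, !st.2.2.1, st.2.2.2)
  else if op = 'P' then
    if st.1 < st.2.1 then
      if st.2.2.1 then (st.1, st.2.1 - 1, st.2.2.1, st.2.2.2 ++ [s.getD (st.2.1 - 1) ' '])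
      else (st.1 + 1, st.2.1, st.2.2.1, st.2.2.2 ++ [s.getD st.1 ' '])
    else st
  else st

def StringOperator_alt (string : String) (operations : String) : String :=
  let s := string.toList
  let st := operations.toList.foldl (bStep s) (0, s.length, false, [])
  let mid := (s.drop st.1).take (st.2.1 - st.1)   -- string[lo:hi]  (in range; exact)
  String.mk (st.2.2.2 ++ (if st.2.2.1 then mid.reverse else mid))

-- ===== PRECONDITION & SPEC =====
def Spec_StringOperator (string : String) (operations : String) (out : String) : Prop := out = StringOperator_alt string operations
instance (string : String) (operations : String) (out : String) : Decidable (Spec_StringOperator string operations out) := by unfold Spec_StringOperator; infer_instance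

-- ===== CLAIM (what is proved, stated in full; the proofs are below) =====
def Claim_equal_StringOperator : Prop := ∀ (string : String) (operations : String), Dom_StringOperator string operations → Spec_StringOperator string operations (StringOperator string operations)

-- ===== LEMMAS AND PROOFS =====

-- the window letters of B's state, as A's letters list
def pvView (s : List Char) (lo hi : Nat) (rev : Bool) : List Char :=
  if rev then ((s.drop lo).take (hi - lo)).reverse else (s.drop lo).take (hi - lo)

theorem pvView_cons (s : List Char) (lo hi : Nat) (h1 : lo < hi) (h2 : hi ≤ s.length) :
    (s.drop lo).take (hi - lo) = s.getD lo ' ' :: (s.drop (lo + 1)).take (hi - (lo + 1)) := by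
  have hlt : lo < s.length := lt_of_lt_of_le h1 h2
  rw [List.drop_eq_getElem_cons hlt, List.getD_eq_getElem s ' ' hlt]
  have : hi - lo = (hi - (lo + 1)) + 1 := by omega
  rw [this, List.take_succ_cons]

theorem pvView_concat (s : List Char) (lo hi : Nat) (h1 : lo < hi) (h2 : hi ≤ s.length) :
    (s.drop lo).take (hi - lo) = (s.drop lo).take ((hi - 1) - lo) ++ [s.getD (hi - 1) ' '] := by
  have hlt : hi - 1 < s.length := by omega
  have : hi - lo = ((hi - 1) - lo) + 1 := by omega
  rw [this, List.take_succ]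
  have hidx : (s.drop lo)[(hi - 1) - lo]? = some s[hi - 1] := by
    rw [List.getElem?_drop]
    have : lo + ((hi - 1) - lo) = hi - 1 := by omega
    rw [this, List.getElem?_eq_getElem hlt]
  rw [hidx, List.getD_eq_getElem s ' ' hlt]
  rfl

theorem pvMain (s : List Char) (ops : List Char) :
    ∀ (lo hi : Nat) (rev : Bool) (out : List Char), lo ≤ hi → hi ≤ s.length →
      (ops.foldl (bStep s) (lo, hi, rev, out)).1 ≤ (ops.foldl (bStep s) (lo, hi, rev, out)).2.1 ∧
      (ops.foldl (bStep s) (lo, hi, rev, out)).2.1 ≤ s.length ∧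
      ops.foldl aStep (pvView s lo hi rev, out) =
        (pvView s (ops.foldl (bStep s) (lo, hi, rev, out)).1
                  (ops.foldl (bStep s) (lo, hi, rev, out)).2.1
                  (ops.foldl (bStep s) (lo, hi, rev, out)).2.2.1,
         (ops.foldl (bStep s) (lo, hi, rev, out)).2.2.2) := by
  induction ops with
  | nil => intro lo hi rev out h1 h2; exact ⟨h1, h2, rfl⟩
  | cons op rest ih =>
    intro lo hi rev out h1 h2
    simp only [List.foldl_cons]
    by_cases hR : op = 'R'
    · have hb : bStep s (lo, hi, rev, out) op = (lo, hi, !rev, out) := by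
        simp [bStep, hR]
      have ha : aStep (pvView s lo hi rev, out) op = (pvView s lo hi (!rev), out) := by
        simp only [aStep, hR, if_pos rfl]
        cases rev <;> simp [pvView]
      rw [hb, ha]; exact ih lo hi (!rev) out h1 h2
    · by_cases hP : op = 'P'
      · by_cases hlt : lo < hi
        · cases hrev : rev with
          | false =>
            have hb : bStep s (lo, hi, false, out) op
                = (lo + 1, hi, false, out ++ [s.getD lo ' ']) := by
              simp [bStep, hR, hP, hlt]
            have hv : pvView s lo hi false
                = s.getD lo ' ' :: pvView s (lo + 1) hi false := by
              simp only [pvView, if_neg Bool.false_ne_true]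
              exact pvView_cons s lo hi hlt h2
            have ha : aStep (pvView s lo hi false, out) op
                = (pvView s (lo + 1) hi false, out ++ [s.getD lo ' ']) := by
              rw [hv]; simp [aStep, hR, hP]
            rw [hb, ha]; exact ih (lo + 1) hi false (out ++ [s.getD lo ' ']) (by omega) h2
          | true =>
            have hb : bStep s (lo, hi, true, out) op
                = (lo, hi - 1, true, out ++ [s.getD (hi - 1) ' ']) := by
              simp [bStep, hR, hP, hlt]
            have hv : pvView s lo hi true
                = s.getD (hi - 1) ' ' :: pvView s lo (hi - 1) true := by
              simp only [pvView, if_pos rfl]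
              rw [pvView_concat s lo hi hlt h2, List.reverse_append]
              rfl
            have ha : aStep (pvView s lo hi true, out) op
                = (pvView s lo (hi - 1) true, out ++ [s.getD (hi - 1) ' ']) := by
              rw [hv]; simp [aStep, hR, hP]
            rw [hb, ha]
            exact ih lo (hi - 1) true (out ++ [s.getD (hi - 1) ' ']) (by omega) (by omega)
        · have hlohi : lo = hi := by omega
          have hb : bStep s (lo, hi, rev, out) op = (lo, hi, rev, out) := by
            simp [bStep, hR, hP, hlt]
          have hv : pvView s lo hi rev = [] := by
            simp [pvView, hlohi]
          have ha : aStep (pvView s lo hi rev, out) op = (pvView s lo hi rev, out) := by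
            rw [hv]; simp [aStep, hR, hP]
          rw [hb, ha]; exact ih lo hi rev out h1 h2
      · have hb : bStep s (lo, hi, rev, out) op = (lo, hi, rev, out) := by
          simp [bStep, hR, hP]
        have ha : aStep (pvView s lo hi rev, out) op = (pvView s lo hi rev, out) := by
          simp [aStep, hR, hP]
        rw [hb, ha]; exact ih lo hi rev out h1 h2

-- ===== VERDICT (by name: the statement is the Claim_ definition above) =====
theorem StringOperator_spec : Claim_equal_StringOperator := by
  intro string operations _
  unfold Spec_StringOperator StringOperator StringOperator_alt
  have h := pvMain string.toList operations.toList 0 string.toList.length false []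
    (Nat.zero_le _) (le_refl _)
  have hinit : pvView string.toList 0 string.toList.length false = string.toList := by
    simp [pvView]
  rw [hinit] at h
  rw [h.2.2]
  simp only [pvView]
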